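-- pv_equiv track=rewrite | github.com/sheryloe/BloggerGent | apps/api/scripts/rewrite_cloudflare_low_score_posts.py | _inject_images_evenly
-- ===== SOURCE A (Python) =====
-- def _inject_images_evenly(content: str, replacements: list[tuple[str, str]]) -> str:
--     snippets = [snippet for _token, snippet in replacements]
--     if not snippets:
--         return content
--     lines = (content or "").splitlines()
--     if not lines:
--         return "\n\n".join(snippets)
--     insertion_points = [
--         max(0, min(len(lines), int((index + 1) * len(lines) / (len(snippets) + 1))))
--         for index in range(len(snippets))
--     ]
--     offset = 0
--     for point, snippet in zip(insertion_points, snippets):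
--         lines.insert(point + offset, snippet)
--         offset += 1
--     return "\n".join(lines)
-- ===== SOURCE B (Python) =====
-- def _inject_images_evenly(content: str, replacements: list[tuple[str, str]]) -> str:
--     snippets = [snippet for _token, snippet in replacements]
--     if not snippets:
--         return content
--     lines = (content or "").splitlines()
--     if not lines:
--         return "\n\n".join(snippets)
--     insertion_points = [
--         max(0, min(len(lines), int((index + 1) * len(lines) / (len(snippets) + 1))))
--         for index in range(len(snippets))
--     ]
--     pairs = list(zip(insertion_points, snippets))
--     result = []
--     j = 0
--     for i, line in enumerate(lines):
--         while j < len(pairs) and pairs[j][0] <= i: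
--             result.append(pairs[j][1])
--             j += 1
--         result.append(line)
--     result.extend(snippet for _point, snippet in pairs[j:])
--     return "\n".join(result)
-- ===== Notes on version B (the rewrite author's own statement) =====
-- stated objective: alternative
-- what changed: Instead of mutating the line list with repeated list.insert calls tracked by a running offset, B builds the output in a single merge pass over the lines, emitting each pending snippet when the walk reaches its insertion point and flushing trailing snippets at the end.
import Mathlib
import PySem

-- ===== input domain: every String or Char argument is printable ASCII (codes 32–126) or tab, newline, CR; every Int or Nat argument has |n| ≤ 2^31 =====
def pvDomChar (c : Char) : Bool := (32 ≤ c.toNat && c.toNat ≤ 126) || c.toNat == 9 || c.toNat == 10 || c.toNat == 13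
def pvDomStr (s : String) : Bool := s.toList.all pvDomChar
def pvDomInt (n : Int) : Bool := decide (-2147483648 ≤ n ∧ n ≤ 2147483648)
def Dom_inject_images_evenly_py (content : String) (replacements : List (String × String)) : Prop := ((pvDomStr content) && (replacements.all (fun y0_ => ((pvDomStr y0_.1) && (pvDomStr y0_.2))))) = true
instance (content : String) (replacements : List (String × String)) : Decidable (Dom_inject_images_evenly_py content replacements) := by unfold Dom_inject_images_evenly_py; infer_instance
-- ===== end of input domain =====

-- B replaces A's repeated list.insert with a running offset by one merge pass that interleaves
-- the snippets with the lines (same early returns, same insertion points); objective: alternative.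

-- ===== PORT A =====
-- 'int((index+1)*len(lines)/(len(snippets)+1))' is ported as floor division, which is exact
-- here: both operands are nonnegative integers.
def inject_images_evenly_py (content : String) (replacements : List (String × String)) : String :=
  let snippets := replacements.map (fun pr => pr.2)
  if snippets = [] then content
  else
    let lines := PySem.Str.splitlines (if content = "" then "" else content)
    if lines = [] then PySem.Str.join "\n\n" snippets
    else
      let L : Int := (lines.length : Int)
      let insertion_points : List Int :=
        (PySem.List.pyRange 0 (snippets.length : Int) 1).map (fun index =>
          max 0 (min L (PySem.Int.floordiv ((index + 1) * L) ((snippets.length : Int) + 1))))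
      let final := (insertion_points.zip snippets).foldl
        (fun st ps => (PySem.List.insert st.1 (ps.1 + st.2) ps.2, st.2 + 1))
        (lines, (0 : Int))
      PySem.Str.join "\n" final.1

-- ===== PORT B =====
-- the merge loop of Source B: walk the lines with index i, emitting every still-pending snippet
-- whose insertion point is ≤ i before the line, then flush the remaining snippets at the end
def injectMergeB : Int → List String → List (Int × String) → List String
  | _, [], ps => ps.map (fun pr => pr.2)
  | i, line :: rest, ps =>
      (ps.takeWhile (fun pr => pr.1 ≤ i)).map (fun pr => pr.2)
        ++ line :: injectMergeB (i + 1) rest (ps.dropWhile (fun pr => pr.1 ≤ i))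

def inject_images_evenly_py_alt (content : String) (replacements : List (String × String)) : String :=
  let snippets := replacements.map (fun pr => pr.2)
  if snippets = [] then content
  else
    let lines := PySem.Str.splitlines (if content = "" then "" else content)
    if lines = [] then PySem.Str.join "\n\n" snippets
    else
      let L : Int := (lines.length : Int)
      let insertion_points : List Int :=
        (PySem.List.pyRange 0 (snippets.length : Int) 1).map (fun index =>
          max 0 (min L (PySem.Int.floordiv ((index + 1) * L) ((snippets.length : Int) + 1))))
      PySem.Str.join "\n" (injectMergeB 0 lines (insertion_points.zip snippets))

-- ===== PRECONDITION & SPEC =====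
def Spec_inject_images_evenly_py (content : String) (replacements : List (String × String)) (out : String) : Prop := out = inject_images_evenly_py_alt content replacements
instance (content : String) (replacements : List (String × String)) (out : String) : Decidable (Spec_inject_images_evenly_py content replacements out) := by unfold Spec_inject_images_evenly_py; infer_instance

-- ===== CLAIM (what is proved, stated in full; the proofs are below) =====
def Claim_equal_inject_images_evenly_py : Prop := ∀ (content : String) (replacements : List (String × String)), Dom_inject_images_evenly_py content replacements → Spec_inject_images_evenly_py content replacements (inject_images_evenly_py content replacements)

-- ===== LEMMAS AND PROOFS =====

-- Nat-world model of A's insert loop (offset o = number of snippets already inserted);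
-- take/drop clamp exactly like Python's list.insert
def aIns : List String → Nat → List (Nat × String) → List String
  | lines, _, [] => lines
  | lines, o, (p, s) :: rest =>
      aIns (lines.take (p + o) ++ s :: lines.drop (p + o)) (o + 1) rest

-- Nat-world model of B's merge loop
def bMerge : Nat → List String → List (Nat × String) → List String
  | _, [], ps => ps.map (fun pr => pr.2)
  | i, line :: rest, ps =>
      (ps.takeWhile (fun pr => pr.1 ≤ i)).map (fun pr => pr.2)
        ++ line :: bMerge (i + 1) rest (ps.dropWhile (fun pr => pr.1 ≤ i))

-- common closed form: cut the lines at each (relative) insertion point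
def specIns : List String → List (Nat × String) → List String
  | lines, [] => lines
  | lines, (p, s) :: rest =>
      lines.take p ++ s :: specIns (lines.drop p) (rest.map (fun pr => (pr.1 - p, pr.2)))
  termination_by _ ps => ps.length
  decreasing_by simp

-- inserting behind a fixed prefix: drop the prefix and shift the points
theorem aIns_shift : ∀ (ps : List (Nat × String)) (pre lines : List String) (o o' : Nat),
    (∀ pr ∈ ps, pre.length + o' ≤ pr.1 + o) →
    aIns (pre ++ lines) o ps
      = pre ++ aIns lines o' (ps.map (fun pr => (pr.1 + o - o' - pre.length, pr.2)))
  | [], _, _, _, _, _ => rfl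
  | (p, s) :: tl, pre, lines, o, o', h => by
      have hp := h (p, s) (by simp)
      simp only [aIns, List.map_cons]
      have htake : (pre ++ lines).take (p + o) = pre ++ lines.take (p + o - pre.length) := by
        rw [List.take_append, List.take_of_length_le (by omega)]
      have hdrop : (pre ++ lines).drop (p + o) = lines.drop (p + o - pre.length) := by
        rw [List.drop_append, List.drop_of_length_le (by omega)]
        simp
      rw [htake, hdrop,
        show pre ++ lines.take (p + o - pre.length) ++ s :: lines.drop (p + o - pre.length)
          = pre ++ (lines.take (p + o - pre.length) ++ s :: lines.drop (p + o - pre.length)) by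
            simp,
        aIns_shift tl pre _ (o + 1) (o' + 1)
          (by intro pr hpr; have := h pr (List.mem_cons_of_mem _ hpr); omega)]
      have h1 : p + o - o' - pre.length + o' = p + o - pre.length := by omega
      have h2 : ∀ pr : Nat × String,
          (pr.1 + (o + 1) - (o' + 1) - pre.length, pr.2)
            = (pr.1 + o - o' - pre.length, pr.2) := by
        intro pr; simp only [Prod.mk.injEq, and_true]; omega
      simp only [h1, h2]

theorem aIns_eq_specIns : ∀ (ps : List (Nat × String)) (lines : List String),
    (ps.map Prod.fst).Pairwise (· ≤ ·) →
    (∀ pr ∈ ps, pr.1 ≤ lines.length) →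
    aIns lines 0 ps = specIns lines ps
  | [], lines, _, _ => by simp [aIns, specIns]
  | (p, s) :: tl, lines, hsort, hle => by
      have hp : p ≤ lines.length := hle (p, s) (by simp)
      simp only [List.map_cons, List.pairwise_cons] at hsort
      simp only [aIns, Nat.add_zero]
      have hsplit : lines.take p ++ s :: lines.drop p
          = (lines.take p ++ [s]) ++ lines.drop p := by simp
      rw [hsplit, aIns_shift tl (lines.take p ++ [s]) (lines.drop p) 1 0 (by
        intro pr hpr
        have h1 : p ≤ pr.1 := hsort.1 pr.1 (List.mem_map_of_mem hpr)
        simp only [List.length_append, List.length_take, List.length_cons, List.length_nil]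
        omega)]
      have hmap : tl.map (fun pr => (pr.1 + 1 - 0 - (lines.take p ++ [s]).length, pr.2))
          = tl.map (fun pr => (pr.1 - p, pr.2)) := by
        apply List.map_congr_left
        intro pr hpr
        have h1 : p ≤ pr.1 := hsort.1 pr.1 (List.mem_map_of_mem hpr)
        have hlen : (lines.take p ++ [s]).length = min p lines.length + 1 := by simp
        simp only [hlen, Prod.mk.injEq, and_true]
        omega
      rw [hmap, aIns_eq_specIns (tl.map (fun pr => (pr.1 - p, pr.2))) (lines.drop p)
        (by
          rw [List.map_map]
          exact List.pairwise_map.mpr ((List.pairwise_map.mp hsort.2).imp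
            (by intro a b hab; simpa using Nat.sub_le_sub_right hab p)))
        (by
          intro pr hpr
          simp only [List.mem_map] at hpr
          obtain ⟨q, hq, rfl⟩ := hpr
          have h2 : q.1 ≤ lines.length := hle q (List.mem_cons_of_mem _ hq)
          simp only [List.length_drop]
          omega)]
      conv_rhs => rw [specIns.eq_def]
      simp
  termination_by ps => ps.length
  decreasing_by simp

theorem specIns_nil : ∀ (ps : List (Nat × String)), specIns [] ps = ps.map (fun pr => pr.2)
  | [] => by simp [specIns]
  | (p, s) :: tl => by
      rw [specIns.eq_def]
      simp only [List.take_nil, List.drop_nil, List.nil_append]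
      rw [specIns_nil (tl.map (fun pr => (pr.1 - p, pr.2)))]
      simp
  termination_by ps => ps.length
  decreasing_by simp

theorem specIns_peel (qs : List (Nat × String)) (l : String) (ls : List String)
    (h : ∀ q ∈ qs, 1 ≤ q.1) :
    specIns (l :: ls) qs = l :: specIns ls (qs.map (fun pr => (pr.1 - 1, pr.2))) := by
  cases qs with
  | nil => simp [specIns]
  | cons hd rest =>
      obtain ⟨q, s⟩ := hd
      have hq : 1 ≤ q := h (q, s) (by simp)
      rw [specIns.eq_def]
      conv_rhs => rw [specIns.eq_def]
      simp only [List.map_cons]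
      have htake : (l :: ls).take q = l :: ls.take (q - 1) := by
        cases q with
        | zero => omega
        | succ n => simp
      have hdrop : (l :: ls).drop q = ls.drop (q - 1) := by
        cases q with
        | zero => omega
        | succ n => simp
      rw [htake, hdrop]
      simp only [List.cons_append, List.cons.injEq, true_and, List.map_map]
      rw [show (List.map ((fun pr : Nat × String => (pr.1 - (q - 1), pr.2))
            ∘ fun pr : Nat × String => (pr.1 - 1, pr.2)) rest)
          = List.map (fun pr : Nat × String => (pr.1 - q, pr.2)) rest by
        apply List.map_congr_left
        intro pr _
        simp only [Function.comp_apply, Prod.mk.injEq, and_true]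
        omega]

theorem bMerge_nil_ps : ∀ (i : Nat) (lines : List String), bMerge i lines [] = lines := by
  intro i lines
  induction lines generalizing i with
  | nil => rfl
  | cons l ls ih => simp [bMerge, ih]

theorem bMerge_eq_specIns : ∀ (lines : List String) (i : Nat) (ps : List (Nat × String)),
    (ps.map Prod.fst).Pairwise (· ≤ ·) →
    (∀ pr ∈ ps, i ≤ pr.1) →
    bMerge i lines ps = specIns lines (ps.map (fun pr => (pr.1 - i, pr.2))) := by
  intro lines
  induction lines with
  | nil =>
      intro i ps _ _
      simp [bMerge, specIns_nil, List.map_map, Function.comp]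
  | cons l ls ih =>
      intro i ps
      induction ps with
      | nil => intro _ _; simp [bMerge_nil_ps, specIns]
      | cons hd rest ihps =>
          intro hsort hb
          obtain ⟨p, s⟩ := hd
          have hsort' := hsort
          simp only [List.map_cons, List.pairwise_cons] at hsort'
          have hp : i ≤ p := hb (p, s) (by simp)
          by_cases hpi : p ≤ i
          · have hpe : p - i = 0 := by omega
            have hstep : bMerge i (l :: ls) ((p, s) :: rest) = s :: bMerge i (l :: ls) rest := by
              simp [bMerge, List.takeWhile_cons_of_pos, List.dropWhile_cons_of_pos, hpi]
            rw [hstep, List.map_cons, hpe, specIns.eq_def]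
            simp only [List.take_zero, List.drop_zero, List.nil_append, List.cons.injEq, true_and,
              Nat.sub_zero, Prod.mk.eta, List.map_id_fun', id]
            exact ihps hsort'.2 (fun pr hpr => hb pr (List.mem_cons_of_mem _ hpr))
          · have hstep : bMerge i (l :: ls) ((p, s) :: rest)
                = l :: bMerge (i + 1) ls ((p, s) :: rest) := by
              simp [bMerge, List.takeWhile_cons_of_neg, List.dropWhile_cons_of_neg, hpi]
            have hge : ∀ pr ∈ (p, s) :: rest, i + 1 ≤ pr.1 := by
              intro pr hpr
              rcases List.mem_cons.mp hpr with h | h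
              · subst h; omega
              · have := hsort'.1 pr.1 (List.mem_map_of_mem h)
                omega
            rw [hstep, ih (i + 1) ((p, s) :: rest) hsort hge]
            rw [specIns_peel (((p, s) :: rest).map (fun pr => (pr.1 - i, pr.2))) l ls (by
              intro q hq
              simp only [List.mem_map] at hq
              obtain ⟨pr, hpr, rfl⟩ := hq
              have := hge pr hpr
              simp only
              omega)]
            congr 1
            congr 1
            rw [List.map_map]
            apply List.map_congr_left
            intro pr _
            simp only [Function.comp_apply, Prod.mk.injEq, and_true]
            omega

-- bridge: the Int-state fold of port A is the Nat-world insert loop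
theorem bridgeA : ∀ (ps : List (Int × String)) (lines : List String) (o : Nat),
    (∀ pr ∈ ps, 0 ≤ pr.1 ∧ pr.1 + (o : Int) ≤ (lines.length : Int)) →
    (ps.foldl (fun st pr => (PySem.List.insert st.1 (pr.1 + st.2) pr.2, st.2 + 1))
        (lines, (o : Int))).1
      = aIns lines o (ps.map (fun pr => (pr.1.toNat, pr.2))) := by
  intro ps
  induction ps with
  | nil => intro lines o _; rfl
  | cons hd tl ih =>
      intro lines o h
      obtain ⟨p, s⟩ := hd
      have hp := h (p, s) (by simp)
      simp only [List.foldl_cons, List.map_cons]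
      have hidx : p + (o : Int) = ((p.toNat + o : Nat) : Int) := by push_cast; omega
      have hins : PySem.List.insert lines (p + (o : Int)) s
          = lines.take (p.toNat + o) ++ s :: lines.drop (p.toNat + o) := by
        rw [hidx]
        exact PySem.List.insert_natCast lines (p.toNat + o) s (by omega)
      have hoff : (o : Int) + 1 = ((o + 1 : Nat) : Int) := by push_cast; ring
      rw [hins, hoff, aIns]
      exact ih _ (o + 1) (by
        intro pr hpr
        have := h pr (List.mem_cons_of_mem _ hpr)
        have hlen : (lines.take (p.toNat + o) ++ s :: lines.drop (p.toNat + o)).length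
            = lines.length + 1 := by simp
        rw [hlen]
        push_cast
        omega)

-- bridge: port B's merge with Int index equals the Nat-world merge
theorem bridgeB : ∀ (lines : List String) (i : Nat) (ps : List (Int × String)),
    injectMergeB (i : Int) lines ps
      = bMerge i lines (ps.map (fun pr => (pr.1.toNat, pr.2))) := by
  intro lines
  induction lines with
  | nil => intro i ps; simp [injectMergeB, bMerge, List.map_map, Function.comp]
  | cons l ls ih =>
      intro i ps
      rw [injectMergeB, bMerge]
      have hpred : ((fun pr : Nat × String => decide (pr.1 ≤ i))
            ∘ (fun pr : Int × String => ((pr.1.toNat, pr.2) : Nat × String)))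
          = (fun pr : Int × String => decide (pr.1 ≤ (i : Int))) := by
        funext pr
        by_cases h : pr.1 ≤ (i : Int) <;> simp [Function.comp, h, Int.toNat_le]
      have htw : (ps.map (fun pr => ((pr.1.toNat, pr.2) : Nat × String))).takeWhile
            (fun pr => decide (pr.1 ≤ i))
          = (ps.takeWhile (fun pr => decide (pr.1 ≤ (i : Int)))).map
            (fun pr => (pr.1.toNat, pr.2)) := by
        rw [List.takeWhile_map, hpred]
      have hdw : (ps.map (fun pr => ((pr.1.toNat, pr.2) : Nat × String))).dropWhile
            (fun pr => decide (pr.1 ≤ i))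
          = (ps.dropWhile (fun pr => decide (pr.1 ≤ (i : Int)))).map
            (fun pr => (pr.1.toNat, pr.2)) := by
        rw [List.dropWhile_map, hpred]
      rw [htw, hdw, List.map_map]
      have hcast : (i : Int) + 1 = ((i + 1 : Nat) : Int) := by push_cast; ring
      rw [hcast, ih (i + 1)]
      simp [Function.comp]

-- ===== VERDICT (by name: the statement is the Claim_ definition above) =====
theorem inject_images_evenly_py_spec : Claim_equal_inject_images_evenly_py := by
  unfold Claim_equal_inject_images_evenly_py
  intro content replacements _
  unfold Spec_inject_images_evenly_py
  unfold inject_images_evenly_py inject_images_evenly_py_alt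
  by_cases h1 : replacements.map (fun pr => pr.2) = []
  · simp only [h1, if_pos]
  · simp only [h1, ite_false]
    set snips := replacements.map (fun pr => pr.2) with hsnips
    set lines := PySem.Str.splitlines (if content = "" then "" else content) with hlines
    by_cases h2 : lines = []
    · simp only [h2, if_pos]
    · simp only [h2, ite_false]
      set L : Int := (lines.length : Int) with hL
      set pts : List Int := (PySem.List.pyRange 0 (snips.length : Int) 1).map (fun index =>
        max 0 (min L (PySem.Int.floordiv ((index + 1) * L) ((snips.length : Int) + 1)))) with hpts
      congr 1
      -- membership facts about the insertion points
      have hmemPts : ∀ q ∈ pts, 0 ≤ q ∧ q ≤ L := by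
        intro q hq
        rw [hpts] at hq
        simp only [List.mem_map] at hq
        obtain ⟨idx, _, rfl⟩ := hq
        refine ⟨le_max_left _ _, max_le ?_ (min_le_left _ _)⟩
        rw [hL]; positivity
      have hmem : ∀ pr ∈ pts.zip snips, 0 ≤ pr.1 ∧ pr.1 ≤ L := by
        intro pr hpr
        exact hmemPts pr.1 (List.of_mem_zip hpr).1
      -- the points are sorted
      have hfst : (pts.zip snips).map Prod.fst = pts := by
        apply List.map_fst_zip
        rw [hpts]
        simp [PySem.List.length_pyRange_one, hsnips]
      have hposn : (0 : Int) < (snips.length : Int) + 1 := by positivity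
      have hsortPts : pts.Pairwise (· ≤ ·) := by
        rw [hpts]
        refine List.Pairwise.map _ ?_ (PySem.List.pairwise_lt_pyRange_one 0 (snips.length : Int) )
        intro a b hab
        have hL0 : (0 : Int) ≤ L := by rw [hL]; positivity
        have hfd : PySem.Int.floordiv ((a + 1) * L) ((snips.length : Int) + 1)
            ≤ PySem.Int.floordiv ((b + 1) * L) ((snips.length : Int) + 1) := by
          rw [PySem.Int.floordiv_eq_ediv_of_pos hposn, PySem.Int.floordiv_eq_ediv_of_pos hposn]
          exact Int.ediv_le_ediv hposn (mul_le_mul_of_nonneg_right (by omega) hL0)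
        exact max_le_max le_rfl (min_le_min le_rfl hfd)
      have hsortNat : (((pts.zip snips).map (fun pr => ((pr.1.toNat, pr.2) : Nat × String))).map
          Prod.fst).Pairwise (· ≤ ·) := by
        rw [List.map_map]
        rw [show (Prod.fst ∘ fun pr : Int × String => ((pr.1.toNat, pr.2) : Nat × String))
            = (fun pr : Int × String => pr.1.toNat) from rfl]
        rw [show (fun pr : Int × String => pr.1.toNat)
            = (Int.toNat ∘ Prod.fst) from rfl]
        rw [← List.map_map, hfst]
        exact List.Pairwise.map _ (fun a b hab => Int.toNat_le_toNat hab) hsortPts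
      -- A side
      have hA := bridgeA (pts.zip snips) lines 0 (by
        intro pr hpr
        have := hmem pr hpr
        push_cast
        rw [← hL]
        constructor
        · exact this.1
        · simpa using this.2)
      rw [Nat.cast_zero] at hA
      rw [hA]
      -- B side
      rw [show (0 : Int) = ((0 : Nat) : Int) from rfl, bridgeB lines 0 (pts.zip snips)]
      rw [aIns_eq_specIns _ _ hsortNat (by
        intro pr hpr
        simp only [List.mem_map] at hpr
        obtain ⟨q, hq, rfl⟩ := hpr
        have := hmem q hq
        simp only
        omega)]
      rw [bMerge_eq_specIns lines 0 _ hsortNat (by intro pr _; exact Nat.zero_le _)]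
      congr 1
      simp
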